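-- pv_equiv track=rewrite | github.com/josuesolissomoscmi/GPI-ETL | HTGPIPROPHEDEX/__init__.py | get_expiration_symbols_ranges
-- ===== SOURCE A (Python) =====
-- def get_expiration_symbols_ranges(symbols):
--     query_ranges = []
--     actual_value = ["","",""]
--     new_range=[]
--     if (len(symbols) > 0):
--         actual_value = symbols[0]
--         new_range.append(actual_value[0])
--     if (len(symbols) == 0):
--         return query_ranges
--     for i in range(1,len(symbols)):
--         if(symbols[i][2] != actual_value[2]):
--             new_range.append(symbols[i-1][0])
--             new_range.append(actual_value[2])
--             query_ranges.append(new_range)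
--             actual_value = symbols[i]
--             new_range=[]
--             new_range.append(actual_value[0])
--     new_range.append(symbols[len(symbols)-1][0])
--     new_range.append(actual_value[2])
--     query_ranges.append(new_range)
--     return query_ranges
-- ===== SOURCE B (Python) =====
-- def get_expiration_symbols_ranges(symbols):
--     ranges = []
--     i, n = 0, len(symbols)
--     while i < n:
--         key = symbols[i][2]
--         j = i
--         while j + 1 < n and symbols[j + 1][2] == key:
--             j += 1
--         ranges.append([symbols[i][0], symbols[j][0], key])
--         i = j + 1
--     return ranges
-- ===== Notes on version B (the rewrite author's own statement) =====
-- stated objective: simpler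
-- what changed: Replaced A's index-lookback state machine (actual_value/new_range accumulators flushed on key change and again after the loop) by a two-pointer run scan that finds each maximal run of equal symbols[i][2] and emits [run_start[0], run_end[0], key] directly.
import Mathlib
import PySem

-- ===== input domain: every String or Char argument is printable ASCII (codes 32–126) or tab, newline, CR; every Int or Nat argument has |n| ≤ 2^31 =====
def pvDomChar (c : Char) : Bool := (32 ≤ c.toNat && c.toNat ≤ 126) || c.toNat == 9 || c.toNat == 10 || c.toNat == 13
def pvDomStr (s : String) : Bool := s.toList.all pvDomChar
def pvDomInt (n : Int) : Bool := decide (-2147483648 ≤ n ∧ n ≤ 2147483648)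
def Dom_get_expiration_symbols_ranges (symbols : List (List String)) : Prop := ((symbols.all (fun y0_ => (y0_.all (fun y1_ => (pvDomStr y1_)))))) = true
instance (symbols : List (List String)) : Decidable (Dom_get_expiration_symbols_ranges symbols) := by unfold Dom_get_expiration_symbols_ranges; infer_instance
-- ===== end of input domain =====

-- B replaces A's index-lookback state machine by a run scan that emits [run_start[0], run_end[0], key]
-- per maximal run of equal symbols[i][2] (objective: simpler; same O(n) cost).

-- ===== PORT A =====
def get_expiration_symbols_ranges (symbols : List (List String)) : List (List String) :=
  let query_ranges : List (List String) := []
  let actual_value0 : List String := ["", "", ""]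
  let new_range0 : List String := []
  let st0 :=
    if symbols.length > 0 then
      let actual_value := PySem.List.pyGetD symbols 0 []
      (actual_value, new_range0 ++ [PySem.List.pyGetD actual_value 0 ""])
    else (actual_value0, new_range0)
  if symbols.length = 0 then query_ranges
  else
    let st := (PySem.List.pyRange 1 (symbols.length : Int) 1).foldl
      (fun (st : List (List String) × List String × List String) i =>
        if PySem.List.pyGetD (PySem.List.pyGetD symbols i []) 2 "" ≠ PySem.List.pyGetD st.2.1 2 "" then
          let nr := st.2.2 ++ [PySem.List.pyGetD (PySem.List.pyGetD symbols (i - 1) []) 0 ""]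
          let nr := nr ++ [PySem.List.pyGetD st.2.1 2 ""]
          let qr := st.1 ++ [nr]
          let actual := PySem.List.pyGetD symbols i []
          (qr, actual, ([] : List String) ++ [PySem.List.pyGetD actual 0 ""])
        else st)
      (query_ranges, st0.1, st0.2)
    st.1 ++ [(st.2.2 ++ [PySem.List.pyGetD (PySem.List.pyGetD symbols ((symbols.length : Int) - 1) []) 0 ""]) ++ [PySem.List.pyGetD st.2.1 2 ""]]

-- ===== PORT B =====
-- Source B's inner while-scan for the end of the current run is ported as takeWhile/dropWhile on the
-- remainder (same traversal, same comparisons); the outer while-loop is the structural recursion.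
def get_expiration_symbols_ranges_alt (symbols : List (List String)) : List (List String) :=
  match symbols with
  | [] => []
  | x :: rest =>
    let key := PySem.List.pyGetD x 2 ""
    let run := rest.takeWhile (fun y => PySem.List.pyGetD y 2 "" == key)
    [PySem.List.pyGetD x 0 "", PySem.List.pyGetD (run.getLastD x) 0 "", key] ::
      get_expiration_symbols_ranges_alt (rest.dropWhile (fun y => PySem.List.pyGetD y 2 "" == key))
termination_by symbols.length
decreasing_by
  simp only [List.length_cons]
  exact Nat.lt_succ_of_le (List.length_dropWhile_le _ _)

-- ===== PRECONDITION & SPEC =====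
-- Pre_ excludes exactly the inputs on which Python A raises IndexError: a row with fewer than
-- three fields (A reads row[0] and row[2] of every row).
def Pre_get_expiration_symbols_ranges (symbols : List (List String)) : Prop :=
  ∀ r ∈ symbols, 3 ≤ r.length
instance (symbols : List (List String)) : Decidable (Pre_get_expiration_symbols_ranges symbols) := by
  unfold Pre_get_expiration_symbols_ranges; infer_instance
def pvWitness_get_expiration_symbols_ranges : List (List String) :=
  [["A", "x", "K"], ["B", "y", "K"], ["C", "z", "M"]]
def Spec_get_expiration_symbols_ranges (symbols : List (List String)) (out : List (List String)) : Prop := out = get_expiration_symbols_ranges_alt symbols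
instance (symbols : List (List String)) (out : List (List String)) : Decidable (Spec_get_expiration_symbols_ranges symbols out) := by unfold Spec_get_expiration_symbols_ranges; infer_instance

-- ===== CLAIM (what is proved, stated in full; the proofs are below) =====
def Claim_equal_get_expiration_symbols_ranges : Prop := ∀ (symbols : List (List String)), Dom_get_expiration_symbols_ranges symbols → Pre_get_expiration_symbols_ranges symbols → Spec_get_expiration_symbols_ranges symbols (get_expiration_symbols_ranges symbols)

-- ===== LEMMAS AND PROOFS =====

def pvG0 (y : List String) : String := PySem.List.pyGetD y 0 ""
def pvG2 (y : List String) : String := PySem.List.pyGetD y 2 ""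

def pvStepA (st : List (List String) × List String × List String)
    (prev cur : List String) : List (List String) × List String × List String :=
  if pvG2 cur ≠ pvG2 st.2.1 then
    (st.1 ++ [(st.2.2 ++ [pvG0 prev]) ++ [pvG2 st.2.1]], cur, ([] : List String) ++ [pvG0 cur])
  else st

def pvWalk {γ : Type} (f : γ → List String → List String → γ) :
    γ → List String → List (List String) → γ
  | acc, _, [] => acc
  | acc, prev, c :: t => pvWalk f (f acc prev c) c t

lemma pvRangeAdj {γ : Type} (f : γ → List String → List String → γ) :
    ∀ (t : List (List String)) (x : List String) (init : γ),
    (List.range t.length).foldl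
      (fun acc k => f acc ((x :: t).getD k []) ((x :: t).getD (k + 1) [])) init
      = pvWalk f init x t := by
  intro t
  induction t with
  | nil => intro x init; simp [pvWalk]
  | cons y t ih =>
    intro x init
    rw [List.length_cons, List.range_succ_eq_map, List.foldl_cons, List.foldl_map]
    simp only [List.getD_cons_zero, List.getD_cons_succ]
    exact ih y (f init x y)

lemma pvFoldA_eq_walk {γ : Type} (f : γ → List String → List String → γ)
    (x : List String) (t : List (List String)) (init : γ) :
    (PySem.List.pyRange 1 ((x :: t).length : Int) 1).foldl
      (fun acc i => f acc (PySem.List.pyGetD (x :: t) (i - 1) []) (PySem.List.pyGetD (x :: t) i [])) init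
      = pvWalk f init x t := by
  rw [PySem.List.pyRange_one, List.foldl_map]
  have hlen : (((x :: t).length : Int) - 1).toNat = t.length := by simp
  rw [hlen, ← pvRangeAdj f t x init]
  apply PySem.List.foldl_congr_mem
  intro acc k hk
  have h1 : (1 : Int) + (k : Int) - 1 = ((k : Nat) : Int) := by omega
  have h2 : (1 : Int) + (k : Int) = (((k + 1 : Nat)) : Int) := by push_cast; omega
  rw [h1, h2, PySem.List.pyGetD_natCast, PySem.List.pyGetD_natCast]

lemma pvAltCons (x : List String) (rest : List (List String)) :
    get_expiration_symbols_ranges_alt (x :: rest)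
      = [pvG0 x, pvG0 ((rest.takeWhile (fun y => pvG2 y == pvG2 x)).getLastD x), pvG2 x]
        :: get_expiration_symbols_ranges_alt (rest.dropWhile (fun y => pvG2 y == pvG2 x)) := by
  rw [get_expiration_symbols_ranges_alt]
  simp [pvG0, pvG2]

lemma pvGetDLast (x : List String) (t : List (List String)) :
    (x :: t).getD t.length [] = t.getLastD x := by
  induction t generalizing x with
  | nil => rfl
  | cons y t ih => rw [List.length_cons, List.getD_cons_succ, List.getLastD_cons]; exact ih y

lemma pvAltNil : get_expiration_symbols_ranges_alt [] = [] := by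
  rw [get_expiration_symbols_ranges_alt]

lemma pvMainA : ∀ (t : List (List String)) (prev x : List String) (qr : List (List String)),
    (let st := pvWalk pvStepA (qr, x, ([] : List String) ++ [pvG0 x]) prev t;
     st.1 ++ [(st.2.2 ++ [pvG0 (t.getLastD prev)]) ++ [pvG2 st.2.1]])
    = qr ++ ([pvG0 x, pvG0 ((t.takeWhile (fun y => pvG2 y == pvG2 x)).getLastD prev), pvG2 x]
        :: get_expiration_symbols_ranges_alt (t.dropWhile (fun y => pvG2 y == pvG2 x))) := by
  intro t
  induction t with
  | nil =>
    intro prev x qr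
    simp only [pvWalk, List.takeWhile_nil, List.dropWhile_nil, List.getLastD_nil, pvAltNil]
    simp
  | cons c t ih =>
    intro prev x qr
    by_cases h : pvG2 c = pvG2 x
    · have hb : (pvG2 c == pvG2 x) = true := by simp [h]
      have hstep : pvStepA (qr, x, ([] : List String) ++ [pvG0 x]) prev c
          = (qr, x, ([] : List String) ++ [pvG0 x]) := by
        simp [pvStepA, h]
      simp only [pvWalk, hstep, List.takeWhile_cons, List.dropWhile_cons, hb, if_true,
        List.getLastD_cons]
      exact ih c x qr
    · have hb : (pvG2 c == pvG2 x) = false := by simp [h]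
      have hstep : pvStepA (qr, x, ([] : List String) ++ [pvG0 x]) prev c
          = (qr ++ [[pvG0 x, pvG0 prev, pvG2 x]], c, ([] : List String) ++ [pvG0 c]) := by
        simp [pvStepA, h]
      simp only [pvWalk, hstep, List.takeWhile_cons, List.dropWhile_cons, hb, Bool.false_eq_true,
        if_false, List.getLastD_cons, List.getLastD_nil]
      rw [ih c c (qr ++ [[pvG0 x, pvG0 prev, pvG2 x]]), pvAltCons]
      simp

-- ===== VERDICT (by name: the statement is the Claim_ definition above) =====
theorem get_expiration_symbols_ranges_spec : Claim_equal_get_expiration_symbols_ranges := by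
  intro symbols _ _
  unfold Spec_get_expiration_symbols_ranges
  match symbols with
  | [] => rw [pvAltNil]; rfl
  | x :: t =>
    unfold get_expiration_symbols_ranges
    simp only [List.length_cons, Nat.succ_ne_zero, if_false, gt_iff_lt, Nat.succ_pos, if_true,
      PySem.List.pyGetD_zero_cons]
    rw [show (fun (st : List (List String) × List String × List String) i =>
        if PySem.List.pyGetD (PySem.List.pyGetD (x :: t) i []) 2 "" ≠ PySem.List.pyGetD st.2.1 2 "" then
          let nr := st.2.2 ++ [PySem.List.pyGetD (PySem.List.pyGetD (x :: t) (i - 1) []) 0 ""]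
          let nr := nr ++ [PySem.List.pyGetD st.2.1 2 ""]
          let qr := st.1 ++ [nr]
          let actual := PySem.List.pyGetD (x :: t) i []
          (qr, actual, ([] : List String) ++ [PySem.List.pyGetD actual 0 ""])
        else st)
      = (fun st i => pvStepA st (PySem.List.pyGetD (x :: t) (i - 1) []) (PySem.List.pyGetD (x :: t) i [])) from rfl]
    rw [show (((t.length + 1 : Nat)) : Int) = (((x :: t).length) : Int) from by simp]
    rw [pvFoldA_eq_walk pvStepA x t ([], x, ([] : List String) ++ [PySem.List.pyGetD x 0 ""])]
    have hlast : PySem.List.pyGetD (x :: t) (((x :: t).length : Int) - 1) [] = t.getLastD x := by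
      have h2 : ((((x :: t).length : Int)) - 1) = ((t.length : Nat) : Int) := by
        simp
      rw [h2, PySem.List.pyGetD_natCast, pvGetDLast]
    rw [hlast]
    have hm := pvMainA t x x []
    rw [pvAltCons]
    simp only [pvG0, pvG2, List.nil_append] at hm ⊢
    rw [hm]
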